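-- pv_equiv track=rewrite | github.com/atf-inc/dec25_intern_E_security | dashboard/backend/services/stats_service.py | calculate_risk_counts
-- ===== SOURCE A (Python) =====
-- from typing import List, Optional
--
-- def calculate_risk_counts(alerts: List[dict]) -> dict:
--     """Calculate risk level counts (high, medium, low)."""
--     high_risk = sum(1 for a in alerts if a.get("risk_score", 0) > 70)
--     medium_risk = sum(1 for a in alerts if 40 <= a.get("risk_score", 0) <= 70)
--     low_risk = sum(1 for a in alerts if a.get("risk_score", 0) < 40)
--
--     return {
--         "high_risk": high_risk,
--         "medium_risk": medium_risk,
--         "low_risk": low_risk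
--     }
-- ===== SOURCE B (Python) =====
-- def calculate_risk_counts(alerts):
--     """Calculate risk level counts (high, medium, low)."""
--     high_risk = medium_risk = low_risk = 0
--     for a in alerts:
--         score = a.get("risk_score", 0)
--         if score > 70:
--             high_risk += 1
--         elif score >= 40:
--             medium_risk += 1
--         else:
--             low_risk += 1
--     return {
--         "high_risk": high_risk,
--         "medium_risk": medium_risk,
--         "low_risk": low_risk
--     }
-- ===== Notes on version B (the rewrite author's own statement) =====
-- stated objective: simpler
-- what changed: Replaces three separate sum-comprehension passes over alerts with one loop maintaining three counters, reading each alert's risk_score exactly once and classifying it with if/elif/else.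
import Mathlib
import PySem

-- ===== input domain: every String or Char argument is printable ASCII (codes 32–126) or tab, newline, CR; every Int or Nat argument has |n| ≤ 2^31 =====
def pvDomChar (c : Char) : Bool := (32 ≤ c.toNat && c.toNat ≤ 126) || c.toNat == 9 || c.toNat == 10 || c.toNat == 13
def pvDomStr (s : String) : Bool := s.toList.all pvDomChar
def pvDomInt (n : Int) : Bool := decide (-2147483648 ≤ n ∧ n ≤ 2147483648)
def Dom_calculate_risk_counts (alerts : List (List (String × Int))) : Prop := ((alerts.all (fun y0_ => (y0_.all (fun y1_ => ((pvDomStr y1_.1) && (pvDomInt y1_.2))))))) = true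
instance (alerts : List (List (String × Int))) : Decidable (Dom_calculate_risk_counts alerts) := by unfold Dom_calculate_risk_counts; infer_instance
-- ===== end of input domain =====

-- B replaces A's three counting passes over alerts with one loop keeping three counters (objective: simpler).

-- ===== PORT A =====
-- a.get("risk_score", 0)
def pvScore (a : List (String × Int)) : Int := (PySem.Dict.mk a).getD "risk_score" 0

def calculate_risk_counts (alerts : List (List (String × Int))) : List (String × Int) :=
  let high_risk := alerts.foldl (fun acc a => if pvScore a > 70 then acc + 1 else acc) (0 : Int)
  let medium_risk := alerts.foldl (fun acc a => if 40 ≤ pvScore a ∧ pvScore a ≤ 70 then acc + 1 else acc) (0 : Int)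
  let low_risk := alerts.foldl (fun acc a => if pvScore a < 40 then acc + 1 else acc) (0 : Int)
  [("high_risk", high_risk), ("medium_risk", medium_risk), ("low_risk", low_risk)]

-- ===== PORT B =====
def calculate_risk_counts_alt (alerts : List (List (String × Int))) : List (String × Int) :=
  let c := alerts.foldl (fun (acc : Int × Int × Int) a =>
      let score := pvScore a
      if score > 70 then (acc.1 + 1, acc.2.1, acc.2.2)
      else if score ≥ 40 then (acc.1, acc.2.1 + 1, acc.2.2)
      else (acc.1, acc.2.1, acc.2.2 + 1)) (0, 0, 0)
  [("high_risk", c.1), ("medium_risk", c.2.1), ("low_risk", c.2.2)]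

-- ===== PRECONDITION & SPEC =====
def Spec_calculate_risk_counts (alerts : List (List (String × Int))) (out : List (String × Int)) : Prop := out = calculate_risk_counts_alt alerts
instance (alerts : List (List (String × Int))) (out : List (String × Int)) : Decidable (Spec_calculate_risk_counts alerts out) := by unfold Spec_calculate_risk_counts; infer_instance

-- ===== CLAIM (what is proved, stated in full; the proofs are below) =====
def Claim_equal_calculate_risk_counts : Prop := ∀ (alerts : List (List (String × Int))), Dom_calculate_risk_counts alerts → Spec_calculate_risk_counts alerts (calculate_risk_counts alerts)

-- ===== LEMMAS AND PROOFS =====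

-- ===== VERDICT (by name: the statement is the Claim_ definition above) =====
-- counting fold from any start = start + count from 0
theorem pv_foldl_if_shift {α : Type} (p : α → Prop) [DecidablePred p] (l : List α) (c : Int) :
    l.foldl (fun acc x => if p x then acc + 1 else acc) c
      = c + l.foldl (fun acc x => if p x then acc + 1 else acc) 0 := by
  induction l generalizing c with
  | nil => simp
  | cons a rest ih =>
    simp only [List.foldl_cons]
    rw [ih, ih (if p a then (0:Int) + 1 else 0)]
    split <;> ring

-- B's single fold from (h, m, l) adds A's three per-bucket counts componentwise.
theorem pv_fold_triple (alerts : List (List (String × Int))) (h m l : Int) :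
    alerts.foldl (fun (acc : Int × Int × Int) a =>
      let score := pvScore a
      if score > 70 then (acc.1 + 1, acc.2.1, acc.2.2)
      else if score ≥ 40 then (acc.1, acc.2.1 + 1, acc.2.2)
      else (acc.1, acc.2.1, acc.2.2 + 1)) (h, m, l)
    = (h + alerts.foldl (fun acc a => if pvScore a > 70 then acc + 1 else acc) 0,
       m + alerts.foldl (fun acc a => if 40 ≤ pvScore a ∧ pvScore a ≤ 70 then acc + 1 else acc) 0,
       l + alerts.foldl (fun acc a => if pvScore a < 40 then acc + 1 else acc) 0) := by
  induction alerts generalizing h m l with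
  | nil => simp
  | cons a rest ih =>
    simp only [List.foldl_cons]
    by_cases h1 : pvScore a > 70
    · rw [if_pos h1, if_pos h1, if_neg (by omega : ¬ (40 ≤ pvScore a ∧ pvScore a ≤ 70)),
        if_neg (by omega : ¬ pvScore a < 40), ih,
        pv_foldl_if_shift (fun x => pvScore x > 70) rest (0 + 1)]
      simp only [Prod.mk.injEq]
      exact ⟨by ring, trivial⟩
    · by_cases h2 : pvScore a ≥ 40
      · rw [if_neg h1, if_pos h2, if_neg h1, if_pos (by omega : 40 ≤ pvScore a ∧ pvScore a ≤ 70),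
          if_neg (by omega : ¬ pvScore a < 40), ih,
          pv_foldl_if_shift (fun x => 40 ≤ pvScore x ∧ pvScore x ≤ 70) rest (0 + 1)]
        simp only [Prod.mk.injEq]
        exact ⟨trivial, by ring, trivial⟩
      · rw [if_neg h1, if_neg h2, if_neg h1, if_neg (by omega : ¬ (40 ≤ pvScore a ∧ pvScore a ≤ 70)),
          if_pos (by omega : pvScore a < 40), ih,
          pv_foldl_if_shift (fun x => pvScore x < 40) rest (0 + 1)]
        simp only [Prod.mk.injEq]
        exact ⟨trivial, trivial, by ring⟩

theorem calculate_risk_counts_spec : Claim_equal_calculate_risk_counts := by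
  intro alerts _
  unfold Spec_calculate_risk_counts calculate_risk_counts calculate_risk_counts_alt
  rw [pv_fold_triple]
  simp
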